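-- pv_equiv track=rewrite | github.com/QntmSeer/ApexLigase | binder_design/filter_and_rank.py | passes_complexity
-- ===== SOURCE A (Python) =====
-- def passes_complexity(seq: str) -> bool:
--     """
--     Sequence complexity gate — rejects charge-repeat scaffolds before
--     wasting GPU time on designs that will fail Boltz2 ipSAE.
--
--     Derived from v1 post-mortem: design_21 (charge repeats, ELEKKLEELEAR)
--     scored 0.567 on Chai-1 but only 0.4194 on Boltz2 ipSAE.
--
--     Rules:
--       1. No run of 4+ identical consecutive charged residues (KRDEH)
--       2. Charged fraction <= 40%
--       3. Hydrophobic fraction >= 15% (VILMFYW)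
--     """
--     charged    = set('KRDEH')
--     hydrophobic = set('VILMFYW')
--
--     # Rule 1: no charged run >= 4
--     run = 1
--     for i in range(1, len(seq)):
--         if seq[i] == seq[i-1] and seq[i] in charged:
--             run += 1
--             if run >= 4:
--                 return False
--         else:
--             run = 1
--
--     # Rule 2: charge fraction
--     if sum(1 for aa in seq if aa in charged) / len(seq) > 0.40:
--         return False
--
--     # Rule 3: hydrophobic fraction
--     if sum(1 for aa in seq if aa in hydrophobic) / len(seq) < 0.15:
--         return False
--
--     return True
-- ===== SOURCE B (Python) =====
-- import re
--
-- _RUN = re.compile(r'([KRDEH])\1{3}')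
--
-- def passes_complexity(seq: str) -> bool:
--     # Rule 1: any run of 4+ identical charged residues, found by regex
--     if _RUN.search(seq):
--         return False
--     # Rules 2 & 3: both fractions from one pass over the sequence
--     ch = hy = 0
--     for aa in seq:
--         ch += aa in 'KRDEH'
--         hy += aa in 'VILMFYW'
--     n = len(seq)
--     return ch / n <= 0.40 and hy / n >= 0.15
-- ===== Notes on version B (the rewrite author's own statement) =====
-- stated objective: idiomatic
-- what changed: Rule 1's manual run counter is replaced by a regex search for four identical consecutive charged residues, and the two fraction gates are computed in a single pass returning one boolean conjunction instead of an early-return chain.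
import Mathlib
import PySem

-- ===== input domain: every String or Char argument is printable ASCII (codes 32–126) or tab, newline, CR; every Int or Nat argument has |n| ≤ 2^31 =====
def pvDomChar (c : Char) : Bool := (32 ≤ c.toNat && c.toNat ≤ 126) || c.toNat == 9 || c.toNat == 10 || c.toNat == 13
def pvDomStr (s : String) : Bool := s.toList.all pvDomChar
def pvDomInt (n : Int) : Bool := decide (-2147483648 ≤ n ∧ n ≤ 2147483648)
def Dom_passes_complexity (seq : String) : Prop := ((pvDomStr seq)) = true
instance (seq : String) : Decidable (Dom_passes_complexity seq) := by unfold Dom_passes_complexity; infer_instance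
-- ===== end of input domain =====

-- B replaces A's manual run counter by a regex-style sliding-window search and fuses the
-- two fraction counts into one pass (objective: idiomatic; same asymptotic cost).
-- The float comparisons `x/n > 0.40` / `x/n < 0.15` are ported as exact rational
-- comparisons (5x > 2n / 20x < 3n), which agree with the Python doubles on the domain.

def chargedc (c : Char) : Bool :=
  c == 'K' || c == 'R' || c == 'D' || c == 'E' || c == 'H'

def hydroc (c : Char) : Bool :=
  c == 'V' || c == 'I' || c == 'L' || c == 'M' || c == 'F' || c == 'Y' || c == 'W'

-- ===== PORT A =====
-- the `for i in range(1, len(seq))` loop with its `run` counter and early return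
def pvLoopA (prev : Char) (run : Nat) (rest : List Char) : Bool :=
  match rest with
  | [] => true
  | c :: cs =>
    if c == prev && chargedc c then
      if run + 1 ≥ 4 then false else pvLoopA c (run + 1) cs
    else pvLoopA c 1 cs

def passes_complexity (seq : String) : Bool :=
  let l := seq.toList
  let rule1 := match l with | [] => true | x :: xs => pvLoopA x 1 xs
  if rule1 = false then false
  else if 5 * l.countP chargedc > 2 * l.length then false
  else if 20 * l.countP hydroc < 3 * l.length then false
  else true

-- ===== PORT B =====
-- re.search(r'([KRDEH])\1{3}', seq): a match exists iff some window of 4 consecutive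
-- identical charged characters exists; the scan over match start positions:
def pvHasRun4 : List Char → Bool
  | a :: b :: c :: d :: rest =>
      (a == b && b == c && c == d && chargedc a) || pvHasRun4 (b :: c :: d :: rest)
  | _ => false

def passes_complexity_alt (seq : String) : Bool :=
  let l := seq.toList
  if pvHasRun4 l then false
  else
    let p := l.foldl
      (fun (acc : Nat × Nat) aa =>
        (acc.1 + (if chargedc aa then 1 else 0), acc.2 + (if hydroc aa then 1 else 0)))
      (0, 0)
    decide (5 * p.1 ≤ 2 * l.length) && decide (20 * p.2 ≥ 3 * l.length)

-- ===== PRECONDITION & SPEC =====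
-- Pre_ excludes only the empty string, on which A raises ZeroDivisionError (B raises too).
def Pre_passes_complexity (seq : String) : Prop := seq ≠ ""
instance (seq : String) : Decidable (Pre_passes_complexity seq) := by
  unfold Pre_passes_complexity; infer_instance

def pvWitness_passes_complexity : String := "MKV"

def Spec_passes_complexity (seq : String) (out : Bool) : Prop := out = passes_complexity_alt seq
instance (seq : String) (out : Bool) : Decidable (Spec_passes_complexity seq out) := by unfold Spec_passes_complexity; infer_instance

-- ===== CLAIM (what is proved, stated in full; the proofs are below) =====
def Claim_equal_passes_complexity : Prop := ∀ (seq : String), Dom_passes_complexity seq → Pre_passes_complexity seq → Spec_passes_complexity seq (passes_complexity seq)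

-- ===== LEMMAS AND PROOFS =====

-- Short lists have no window of 4.
theorem pvHasRun4_short (l : List Char) (h : l.length ≤ 3) : pvHasRun4 l = false := by
  match l with
  | [] | [_] | [_, _] | [_, _, _] => simp [pvHasRun4]
  | _ :: _ :: _ :: _ :: _ => simp at h; omega

theorem charged_false_of_not (c prev : Char) (h : ¬(c = prev ∧ chargedc c = true))
    (hc : c = prev) : chargedc c = false := by
  cases hcc : chargedc c with
  | false => rfl
  | true => exact absurd ⟨hc, hcc⟩ h

-- A non-continuing head can be dropped (1, 2 or 3 copies of `prev` before a `c` that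
-- does not extend a charged run of `prev`).
theorem pvHasRun4_cons_skip (prev c : Char) (cs : List Char)
    (h : ¬(c = prev ∧ chargedc c = true)) :
    pvHasRun4 (prev :: c :: cs) = pvHasRun4 (c :: cs) := by
  match cs with
  | [] => simp [pvHasRun4]
  | [_] => simp [pvHasRun4]
  | e :: f :: cs' =>
    rw [show pvHasRun4 (prev :: c :: e :: f :: cs')
        = ((prev == c && c == e && e == f && chargedc prev)
           || pvHasRun4 (c :: e :: f :: cs')) from rfl]
    have hw : (prev == c && c == e && e == f && chargedc prev) = false := by
      by_cases hpc : prev = c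
      · have hch : chargedc prev = false := by
          rw [hpc]; exact charged_false_of_not c prev h hpc.symm
        simp [hch]
      · simp [hpc]
    rw [hw, Bool.false_or]

theorem pvHasRun4_skip2 (prev c : Char) (cs : List Char)
    (h : ¬(c = prev ∧ chargedc c = true)) :
    pvHasRun4 (prev :: prev :: c :: cs) = pvHasRun4 (c :: cs) := by
  match cs with
  | [] => simp [pvHasRun4]
  | e :: cs' =>
    rw [show pvHasRun4 (prev :: prev :: c :: e :: cs')
        = ((prev == prev && prev == c && c == e && chargedc prev)
           || pvHasRun4 (prev :: c :: e :: cs')) from rfl]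
    have hw : (prev == prev && prev == c && c == e && chargedc prev) = false := by
      by_cases hpc : prev = c
      · have hch : chargedc prev = false := by
          rw [hpc]; exact charged_false_of_not c prev h hpc.symm
        simp [hch]
      · simp [hpc]
    rw [hw, Bool.false_or]
    exact pvHasRun4_cons_skip prev c (e :: cs') h

theorem pvHasRun4_skip3 (prev c : Char) (cs : List Char)
    (h : ¬(c = prev ∧ chargedc c = true)) :
    pvHasRun4 (prev :: prev :: prev :: c :: cs) = pvHasRun4 (c :: cs) := by
  rw [show pvHasRun4 (prev :: prev :: prev :: c :: cs)
      = ((prev == prev && prev == prev && prev == c && chargedc prev)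
         || pvHasRun4 (prev :: prev :: c :: cs)) from rfl]
  have hw : (prev == prev && prev == prev && prev == c && chargedc prev) = false := by
    by_cases hpc : prev = c
    · have hch : chargedc prev = false := by
        rw [hpc]; exact charged_false_of_not c prev h hpc.symm
      simp [hch]
    · simp [hpc]
  rw [hw, Bool.false_or]
  exact pvHasRun4_skip2 prev c cs h

-- Core correspondence: A's run-counter loop finds a violation exactly when the
-- sliding-window search finds a match, given the loop invariant on (prev, run).
theorem pvLoopA_hasRun4 (rest : List Char) : ∀ (prev : Char) (r : Nat),
    (r = 1 ∨ (chargedc prev = true ∧ (r = 2 ∨ r = 3))) →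
    pvLoopA prev r rest = !pvHasRun4 (List.replicate r prev ++ rest) := by
  induction rest with
  | nil =>
    intro prev r hr
    have hlen : (List.replicate r prev ++ ([] : List Char)).length ≤ 3 := by
      rcases hr with h1 | ⟨_, h2 | h3⟩ <;> simp_all
    rw [pvHasRun4_short _ hlen]
    rfl
  | cons c cs ih =>
    intro prev r hr
    by_cases h : (c = prev ∧ chargedc c = true)
    · obtain ⟨hc, hch⟩ := h
      subst hc
      have hrep : List.replicate r c ++ c :: cs = List.replicate (r+1) c ++ cs := by
        rw [List.replicate_add]
        simp
      rw [hrep]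
      rcases hr with h1 | ⟨hchp, h2 | h3⟩
      · subst h1
        show (if c == c && chargedc c then if (2:Nat) ≥ 4 then false
              else pvLoopA c 2 cs else pvLoopA c 1 cs) = _
        simp [hch]
        exact ih c 2 (Or.inr ⟨hch, Or.inl rfl⟩)
      · subst h2
        show (if c == c && chargedc c then if (3:Nat) ≥ 4 then false
              else pvLoopA c 3 cs else pvLoopA c 1 cs) = _
        simp [hch]
        exact ih c 3 (Or.inr ⟨hch, Or.inr rfl⟩)
      · subst h3
        have hw : pvHasRun4 (c :: c :: c :: c :: cs) = true := by
          rw [show pvHasRun4 (c :: c :: c :: c :: cs)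
                = ((c == c && c == c && c == c && chargedc c)
                   || pvHasRun4 (c :: c :: c :: cs)) from rfl]
          simp [hch]
        show (if c == c && chargedc c then if (4:Nat) ≥ 4 then false
              else pvLoopA c 4 cs else pvLoopA c 1 cs) = _
        simp [hch, hw]
    · have hA : pvLoopA prev r (c :: cs) = pvLoopA c 1 cs := by
        have hb : (c == prev && chargedc c) = false := by
          by_cases hc : c = prev
          · simp [charged_false_of_not c prev h hc]
          · simp [hc]
        show (if c == prev && chargedc c then _ else pvLoopA c 1 cs) = _
        simp [hb]
      rw [hA, ih c 1 (Or.inl rfl)]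
      have hs : pvHasRun4 (List.replicate r prev ++ c :: cs) = pvHasRun4 (c :: cs) := by
        rcases hr with h1 | ⟨_, h2 | h3⟩
        · subst h1; exact pvHasRun4_cons_skip prev c cs h
        · subst h2; exact pvHasRun4_skip2 prev c cs h
        · subst h3; exact pvHasRun4_skip3 prev c cs h
      rw [hs]
      simp

-- B's fused counting pass computes the two countP values.
theorem pvFold_counts (l : List Char) : ∀ (a b : Nat),
    l.foldl (fun (acc : Nat × Nat) aa =>
        (acc.1 + (if chargedc aa then 1 else 0), acc.2 + (if hydroc aa then 1 else 0)))
      (a, b)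
    = (a + l.countP chargedc, b + l.countP hydroc) := by
  induction l with
  | nil => intro a b; simp
  | cons c cs ih =>
    intro a b
    simp only [List.foldl_cons, List.countP_cons, ih]
    by_cases h1 : chargedc c = true <;> by_cases h2 : hydroc c = true <;>
      simp [h1, h2] <;> omega

theorem passes_complexity_eq (seq : String) (h : seq ≠ "") :
    passes_complexity seq = passes_complexity_alt seq := by
  rcases hxl : seq.toList with _ | ⟨x, xs⟩
  · exact absurd (String.toList_inj.mp (by simp [hxl])) h
  · have hrun : pvLoopA x 1 xs = !pvHasRun4 (x :: xs) := by
      have := pvLoopA_hasRun4 xs x 1 (Or.inl rfl)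
      simpa using this
    unfold passes_complexity passes_complexity_alt
    simp only [hxl, hrun, pvFold_counts (x :: xs) 0 0, Nat.zero_add]
    by_cases hr : pvHasRun4 (x :: xs) = true
    · simp [hr]
    · simp only [Bool.not_eq_true] at hr
      simp only [hr, Bool.not_false, List.length_cons]
      by_cases h1 : 2 * (xs.length + 1) < 5 * List.countP chargedc (x :: xs) <;>
        by_cases h2 : 20 * List.countP hydroc (x :: xs) < 3 * (xs.length + 1) <;>
          simp [h1, h2] <;> omega

-- ===== VERDICT (by name: the statement is the Claim_ definition above) =====
theorem passes_complexity_spec : Claim_equal_passes_complexity := by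
  intro seq _ hpre
  unfold Spec_passes_complexity
  exact passes_complexity_eq seq hpre
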